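-- pv_equiv track=rewrite | github.com/miliar/Code_Jam_Webscraper | solutions_python/solutions_year15_round0_nr1/2610.py | solve
-- ===== SOURCE A (Python) =====
-- def solve(input):
-- 	ans = 0
-- 	input = input.split()
-- 	levels = input[0]
-- 	guys = input[1]
-- 	n = 0
-- 	for i, c in enumerate(guys):
-- 		if n < i and i > 0:
-- 			ans = ans + (i-n)
-- 			n = n + (i-n)
-- 		n = n + int(c)
-- 	return ans
-- ===== SOURCE B (Python) =====
-- def solve(input):
--     guys = input.split()[1]
--     deficits = []
--     prefix = 0
--     for i, c in enumerate(guys):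
--         deficits.append(i - prefix)
--         prefix += int(c)
--     return max(deficits, default=0)
-- ===== Notes on version B (the rewrite author's own statement) =====
-- stated objective: simpler
-- what changed: Replaces A's incremental padding of a running headcount (ans and n updated together inside the loop) by the closed form: build the list of prefix deficits i - prefix_i and return its maximum (0 if empty).
import Mathlib
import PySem

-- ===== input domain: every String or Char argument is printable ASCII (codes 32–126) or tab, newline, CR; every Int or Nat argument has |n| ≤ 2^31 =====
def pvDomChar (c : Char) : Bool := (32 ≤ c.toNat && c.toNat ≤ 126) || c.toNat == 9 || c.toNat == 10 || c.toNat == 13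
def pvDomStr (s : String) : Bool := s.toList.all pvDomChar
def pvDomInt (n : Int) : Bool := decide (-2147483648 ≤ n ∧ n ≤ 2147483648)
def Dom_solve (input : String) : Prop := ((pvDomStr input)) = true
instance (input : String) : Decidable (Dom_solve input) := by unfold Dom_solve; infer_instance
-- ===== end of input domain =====

-- B replaces A's incremental "pad the running headcount" loop by the closed form
-- "maximum deficit over all prefixes" (build the deficit list, take its max): simpler, same cost.

-- ===== PORT A =====
-- A: running headcount n, padded up to i whenever it falls short; ans accumulates the pads.
def solve (input : String) : Int :=
  let parts := PySem.Str.split₀ input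
  let _levels := PySem.List.pyGetD parts 0 ""      -- input[0]  (IndexError excluded by Pre_)
  let guys := PySem.List.pyGetD parts 1 ""         -- input[1]  (IndexError excluded by Pre_)
  let st := (PySem.List.enumerate guys.toList 0).foldl
      (fun (p : Int × Int) ic =>
        let q := if p.2 < ic.1 ∧ 0 < ic.1 then (p.1 + (ic.1 - p.2), p.2 + (ic.1 - p.2)) else p
        (q.1, q.2 + (PySem.Int.ofChars? [ic.2]).getD 0))   -- int(c): ValueError excluded by Pre_
      (0, 0)
  st.1

-- ===== PORT B =====
def solve_alt (input : String) : Int :=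
  let guys := PySem.List.pyGetD (PySem.Str.split₀ input) 1 ""
  let st := (PySem.List.enumerate guys.toList 0).foldl
      (fun (p : List Int × Int) ic =>
        (p.1 ++ [ic.1 - p.2], p.2 + (PySem.Int.ofChars? [ic.2]).getD 0))
      ([], 0)
  (PySem.List.max? st.1 (fun y => y)).getD 0

-- ===== PRECONDITION & SPEC =====
-- Pre_ excludes exactly the inputs on which the Python A raises: fewer than two
-- whitespace-separated tokens (IndexError on input[1]) or a non-int character in the
-- second token (ValueError on int(c)).
def Pre_solve (input : String) : Prop :=
  2 ≤ (PySem.Chars.split₀ input.toList).length ∧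
  PySem.Chars.strIsdigit (PySem.List.pyGetD (PySem.Chars.split₀ input.toList) 1 []) = true
instance (input : String) : Decidable (Pre_solve input) := by unfold Pre_solve; infer_instance
def pvWitness_solve : String := "3 1100"
def Spec_solve (input : String) (out : Int) : Prop := out = solve_alt input
instance (input : String) (out : Int) : Decidable (Spec_solve input out) := by unfold Spec_solve; infer_instance

-- ===== CLAIM (what is proved, stated in full; the proofs are below) =====
def Claim_equal_solve : Prop := ∀ (input : String), Dom_solve input → Pre_solve input → Spec_solve input (solve input)

-- ===== LEMMAS AND PROOFS =====

-- value of int(c) as both ports compute it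
def chVal (c : Char) : Int := (PySem.Int.ofChars? [c]).getD 0

-- the list of prefix deficits i - prefix_i, starting at index s with prefix n
def defs : List Char → Int → Int → List Int
  | [], _, _ => []
  | c :: cs, s, n => (s - n) :: defs cs (s + 1) (n + chVal c)

theorem defs_shift (cs : List Char) (s n δ : Int) :
    defs cs s (n + δ) = (defs cs s n).map (· - δ) := by
  induction cs generalizing s n with
  | nil => simp [defs]
  | cons c cs ih =>
      simp only [defs, List.map_cons, List.cons.injEq]
      refine ⟨by omega, ?_⟩
      rw [show n + δ + chVal c = n + chVal c + δ by ring, ih]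

theorem foldl_max_map_sub (L : List Int) (m δ : Int) :
    δ + List.foldl max m (L.map (· - δ)) = List.foldl max (m + δ) L := by
  induction L generalizing m with
  | nil => simp [Int.add_comm]
  | cons x L ih =>
      simp only [List.map_cons, List.foldl_cons]
      rw [ih]
      have hx : max m (x - δ) + δ = max (m + δ) x := by
        rcases le_total m (x - δ) with h | h
        · rw [max_eq_right h, max_eq_right (by omega : m + δ ≤ x)]; omega
        · rw [max_eq_left h, max_eq_left (by omega : x ≤ m + δ)]
      rw [hx]

theorem foldA (cs : List Char) (s ans n : Int) (hs : 1 ≤ s) :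
    ((PySem.List.enumerate cs s).foldl
      (fun (p : Int × Int) ic =>
        ((if p.2 < ic.1 ∧ 0 < ic.1 then (p.1 + (ic.1 - p.2), p.2 + (ic.1 - p.2)) else p).1,
         (if p.2 < ic.1 ∧ 0 < ic.1 then (p.1 + (ic.1 - p.2), p.2 + (ic.1 - p.2)) else p).2
           + (PySem.Int.ofChars? [ic.2]).getD 0))
      (ans, n)).1
    = ans + List.foldl max 0 (defs cs s n) := by
  induction cs generalizing s ans n with
  | nil => simp [PySem.List.enumerate_nil, defs]
  | cons c cs ih =>
      rw [PySem.List.enumerate_cons]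
      simp only [List.foldl_cons, defs, List.foldl_cons]
      by_cases h : n < s
      · have hcond : n < s ∧ 0 < s := ⟨h, by omega⟩
        rw [if_pos hcond]
        rw [ih (s + 1) (ans + (s - n)) (n + (s - n) + (PySem.Int.ofChars? [c]).getD 0) (by omega)]
        have h1 : n + (s - n) + (PySem.Int.ofChars? [c]).getD 0
            = (n + chVal c) + (s - n) := by simp only [chVal]; ring
        rw [h1, defs_shift]
        rw [show ans + (s - n) + List.foldl max 0 ((defs cs (s + 1) (n + chVal c)).map (· - (s - n)))
              = ans + ((s - n) + List.foldl max 0 ((defs cs (s + 1) (n + chVal c)).map (· - (s - n)))) by ring]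
        rw [foldl_max_map_sub]
        have hm : max (0 : Int) (s - n) = s - n := max_eq_right (by omega)
        rw [hm]
        rw [show (0 : Int) + (s - n) = s - n by ring]
      · have hcond : ¬ (n < s ∧ 0 < s) := by omega
        rw [if_neg hcond]
        rw [ih (s + 1) ans (n + (PySem.Int.ofChars? [c]).getD 0) (by omega)]
        have hm : max (0 : Int) (s - n) = 0 := max_eq_left (by omega)
        rw [hm]
        simp only [chVal]

theorem foldB (cs : List Char) (s n : Int) (acc : List Int) :
    ((PySem.List.enumerate cs s).foldl
      (fun (p : List Int × Int) ic =>
        (p.1 ++ [ic.1 - p.2], p.2 + (PySem.Int.ofChars? [ic.2]).getD 0))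
      (acc, n)).1
    = acc ++ defs cs s n := by
  induction cs generalizing s n acc with
  | nil => simp [PySem.List.enumerate_nil, defs]
  | cons c cs ih =>
      rw [PySem.List.enumerate_cons]
      simp only [List.foldl_cons]
      rw [ih]
      simp [defs, chVal, List.append_assoc]

-- ===== VERDICT (by name: the statement is the Claim_ definition above) =====
theorem solve_spec : Claim_equal_solve := by
  intro input _ _
  unfold Spec_solve solve solve_alt
  simp only []
  rw [foldB]
  cases hcs : (PySem.List.pyGetD (PySem.Str.split₀ input) 1 "").toList with
  | nil => simp [PySem.List.enumerate_nil, defs, PySem.List.max?]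
  | cons c cs =>
      rw [PySem.List.enumerate_cons]
      simp only [List.foldl_cons, lt_irrefl, false_and, if_neg, not_false_iff, zero_add]
      rw [foldA cs 1 0 ((PySem.Int.ofChars? [c]).getD 0) (by omega)]
      simp only [defs, List.nil_append, sub_zero, zero_add]
      rw [PySem.List.max?_id_cons]
      simp only [Option.getD_some, chVal]
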